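-- pv_equiv track=rewrite | github.com/Friiyous/generateur-planning | app.py | generer_planning_employe
-- ===== SOURCE A (Python) =====
-- CYCLE = ["PG", "R", "P"]
--
-- def generer_planning_employe(cycle_position, annee, mois):
--     """Générer le planning pour un employé"""
--     import calendar
--     jours_dans_mois = calendar.monthrange(annee, mois + 1)[1]
--     planning = []
--
--     position = cycle_position
--     for jour in range(1, jours_dans_mois + 1):
--         planning.append({
--             "jour": f"{jour:02d}",
--             "shift": CYCLE[position]
--         })
--         position = (position + 1) % len(CYCLE)
--
--     return planning, position
-- ===== SOURCE B (Python) =====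
-- CYCLE = ["PG", "R", "P"]
--
-- def generer_planning_employe(cycle_position, annee, mois):
--     """Générer le planning pour un employé"""
--     import calendar
--     n = calendar.monthrange(annee, mois + 1)[1]
--     start = cycle_position % len(CYCLE)
--     # Stage 1: tile the cycle and slice out this month's shift sequence.
--     reps = (start + n + len(CYCLE) - 1) // len(CYCLE)
--     shifts = (CYCLE * reps)[start:start + n]
--     # Stage 2: pair each shift with its zero-padded day label.
--     planning = [{"jour": "%02d" % d, "shift": s} for d, s in enumerate(shifts, 1)]
--     return planning, (start + n) % len(CYCLE)
-- ===== Notes on version B (the rewrite author's own statement) =====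
-- stated objective: alternative
-- what changed: B builds the whole month's shift sequence in one shot by tiling the cycle via list repetition and slicing out the window [start:start+n], then pairs that sequence with day labels in a second stage; there is no per-day position accumulator or per-day index arithmetic, and the final position is the closed form (start + n) % 3.
import Mathlib
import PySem

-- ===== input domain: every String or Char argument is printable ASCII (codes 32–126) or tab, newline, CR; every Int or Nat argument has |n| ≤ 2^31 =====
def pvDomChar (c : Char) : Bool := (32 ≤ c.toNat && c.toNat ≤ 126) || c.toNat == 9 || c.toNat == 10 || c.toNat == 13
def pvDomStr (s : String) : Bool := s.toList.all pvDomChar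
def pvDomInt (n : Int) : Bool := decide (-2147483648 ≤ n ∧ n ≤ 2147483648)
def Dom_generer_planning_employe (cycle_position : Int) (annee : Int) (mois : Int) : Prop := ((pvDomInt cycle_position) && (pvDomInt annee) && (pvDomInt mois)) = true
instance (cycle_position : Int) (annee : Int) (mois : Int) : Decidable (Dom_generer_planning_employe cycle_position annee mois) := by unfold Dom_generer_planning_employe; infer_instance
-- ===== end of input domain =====

-- B replaces A's per-day position accumulator by tiling the cycle, slicing the
-- month's window out of it, and zipping with day labels (objective: alternative).

-- ===== PORT A =====
-- shared context: CYCLE = ["PG", "R", "P"]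
def pvCYCLE : List String := ["PG", "R", "P"]

-- calendar.isleap(year): year % 4 == 0 and (year % 100 != 0 or year % 400 == 0)
def pvIsLeap (y : Int) : Bool :=
  PySem.Int.mod y 4 == 0 && (PySem.Int.mod y 100 != 0 || PySem.Int.mod y 400 == 0)

-- calendar.mdays (0-indexed sentinel list used by monthrange)
def pvMdays : List Int := [0, 31, 28, 31, 30, 31, 30, 31, 31, 30, 31, 30, 31]

-- calendar.monthrange(year, month)[1] = mdays[month] + (month == 2 and isleap(year));
-- exact for 1 ≤ month ≤ 12 (monthrange raises IllegalMonthError otherwise, excluded by Pre_)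
def pvMonthDays (annee month : Int) : Int :=
  (PySem.List.pyGet? pvMdays month).getD 0 +
    (if month == 2 && pvIsLeap annee then 1 else 0)

-- f"{jour:02d}" / "%02d" % jour: exact for 0 ≤ jour < 100 (day numbers 1..31)
def pvFmt2 (j : Int) : String :=
  if 0 ≤ j && j < 10 then "0" ++ PySem.Int.toStr j else PySem.Int.toStr j

-- A's for-loop over range(1, jours_dans_mois + 1) carrying (planning, position);
-- CYCLE[position] via pyGet? (Python negative indexing; .getD "" is unreachable inside Pre_)
def pvLoopA (cycle_position : Int) (jours : Int) : (List (List (String × String))) × Int :=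
  (PySem.List.pyRange 1 (jours + 1) 1).foldl
    (fun (st : (List (List (String × String))) × Int) jour =>
      (st.1 ++ [[("jour", pvFmt2 jour), ("shift", (PySem.List.pyGet? pvCYCLE st.2).getD "")]],
       PySem.Int.mod (st.2 + 1) 3))
    ([], cycle_position)

def generer_planning_employe (cycle_position : Int) (annee : Int) (mois : Int) : (List (List (String × String))) × Int :=
  pvLoopA cycle_position (pvMonthDays annee (mois + 1))

-- ===== PORT B =====
-- [{"jour": "%02d" % d, "shift": s} for d, s in enumerate(shifts, 1)]
def pvLabel (shifts : List String) : List (List (String × String)) :=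
  (PySem.List.enumerate shifts 1).map
    (fun ds => [("jour", pvFmt2 ds.1), ("shift", ds.2)])

def generer_planning_employe_alt (cycle_position : Int) (annee : Int) (mois : Int) : (List (List (String × String))) × Int :=
  let n := pvMonthDays annee (mois + 1)
  let start := PySem.Int.mod cycle_position 3
  let reps := PySem.Int.floordiv (start + n + 3 - 1) 3
  let shifts := PySem.List.slice (PySem.List.pyRepeat pvCYCLE reps) (some start) (some (start + n))
  (pvLabel shifts, PySem.Int.mod (start + n) 3)

-- ===== PRECONDITION & SPEC =====
-- Pre_ is exactly where A returns: mois+1 must be a legal month (1..12, else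
-- calendar.monthrange raises IllegalMonthError) and CYCLE[cycle_position] must not raise
-- IndexError, i.e. -3 ≤ cycle_position ≤ 2 (negative indices wrap in Python).
def Pre_generer_planning_employe (cycle_position : Int) (annee : Int) (mois : Int) : Prop :=
  (-3 ≤ cycle_position ∧ cycle_position ≤ 2) ∧ (0 ≤ mois ∧ mois ≤ 11)
instance (cycle_position : Int) (annee : Int) (mois : Int) : Decidable (Pre_generer_planning_employe cycle_position annee mois) := by unfold Pre_generer_planning_employe; infer_instance

def pvWitness_generer_planning_employe : Int × Int × Int := (1, 2024, 1)

def Spec_generer_planning_employe (cycle_position : Int) (annee : Int) (mois : Int) (out : (List (List (String × String))) × Int) : Prop := out = generer_planning_employe_alt cycle_position annee mois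
instance (cycle_position : Int) (annee : Int) (mois : Int) (out : (List (List (String × String))) × Int) : Decidable (Spec_generer_planning_employe cycle_position annee mois out) := by unfold Spec_generer_planning_employe; infer_instance

-- ===== CLAIM =====
def Claim_equal_generer_planning_employe : Prop := ∀ (cycle_position : Int) (annee : Int) (mois : Int), Dom_generer_planning_employe cycle_position annee mois → Pre_generer_planning_employe cycle_position annee mois → Spec_generer_planning_employe cycle_position annee mois (generer_planning_employe cycle_position annee mois)

-- ===== LEMMAS AND PROOFS =====

-- the month length is one of 28..31 for a legal month
theorem pvMonthDays_cases (annee mois : Int) (h0 : 0 ≤ mois) (h1 : mois ≤ 11) :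
    pvMonthDays annee (mois + 1) = 28 ∨ pvMonthDays annee (mois + 1) = 29 ∨
    pvMonthDays annee (mois + 1) = 30 ∨ pvMonthDays annee (mois + 1) = 31 := by
  interval_cases mois <;>
    simp [pvMonthDays, pvMdays, PySem.List.pyGet?, PySem.List.pyIdx?] <;>
    cases pvIsLeap annee <;> simp

-- for each in-range starting position and each possible month length,
-- A's accumulator loop equals B's tile-slice-zip form (finitely many closed cases)
theorem pvLoop_eq (cp n : Int) (hcp : -3 ≤ cp ∧ cp ≤ 2)
    (hn : n = 28 ∨ n = 29 ∨ n = 30 ∨ n = 31) :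
    pvLoopA cp n =
      (pvLabel (PySem.List.slice
          (PySem.List.pyRepeat pvCYCLE
            (PySem.Int.floordiv (PySem.Int.mod cp 3 + n + 3 - 1) 3))
          (some (PySem.Int.mod cp 3)) (some (PySem.Int.mod cp 3 + n))),
       PySem.Int.mod (PySem.Int.mod cp 3 + n) 3) := by
  obtain ⟨h0, h1⟩ := hcp
  interval_cases cp <;> rcases hn with rfl | rfl | rfl | rfl <;> decide

-- ===== VERDICT =====
theorem generer_planning_employe_spec : Claim_equal_generer_planning_employe := by
  intro cp annee mois _ hpre
  obtain ⟨hcp, hm⟩ := hpre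
  show generer_planning_employe cp annee mois = generer_planning_employe_alt cp annee mois
  have := pvMonthDays_cases annee mois hm.1 hm.2
  unfold generer_planning_employe generer_planning_employe_alt
  exact pvLoop_eq cp _ hcp this
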